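-- pv_equiv track=rewrite | github.com/hhoh-doona/Programmers | ohh/크레인인형뽑기.py | solution
-- ===== SOURCE A (Python) =====
-- def solution(board, moves):
--     answer = 0
--
--     rlist = []
--
--     board = list(zip(*board))
--
--     for idx in range(len(board)):
--         board[idx] = [i for i in board[idx] if i != 0]
--
--     for i in [j-1 for j in moves]:
--         if len(board[i]) == 0:
--             continue
--
--         sel = board[i].pop(0)
--
--         if len(rlist) !=0 and rlist[-1] == sel:
--             rlist.pop(-1)
--             answer +=1
--         else:
--             rlist.append(sel)
--
--     return answer * 2
-- ===== SOURCE B (Python) =====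
-- def solution(board, moves):
--     nrows = len(board)
--     ncols = min((len(row) for row in board), default=0)
--     cursor = [0] * ncols
--     stack = []
--     pairs = 0
--     for m in moves:
--         col = m - 1
--         r = cursor[col]
--         while r < nrows and board[r][col] == 0:
--             r += 1
--         if r == nrows:
--             continue
--         cursor[col] = r + 1
--         v = board[r][col]
--         if stack and stack[-1] == v:
--             stack.pop()
--             pairs += 1
--         else:
--             stack.append(v)
--     return pairs * 2
-- ===== Notes on version B (the rewrite author's own statement) =====
-- stated objective: alternative
-- what changed: Replaces A's upfront transpose (zip(*board)) plus per-column zero-stripping table consumed destructively with pop(0) by lazy per-column row cursors that scan each column downward on demand, reading the board in place without building or mutating any column table.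
-- outside the precondition, e.g. on solution([[5, 2], [5]], [0, 0]): A returns 2, B returns 0
import Mathlib
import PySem

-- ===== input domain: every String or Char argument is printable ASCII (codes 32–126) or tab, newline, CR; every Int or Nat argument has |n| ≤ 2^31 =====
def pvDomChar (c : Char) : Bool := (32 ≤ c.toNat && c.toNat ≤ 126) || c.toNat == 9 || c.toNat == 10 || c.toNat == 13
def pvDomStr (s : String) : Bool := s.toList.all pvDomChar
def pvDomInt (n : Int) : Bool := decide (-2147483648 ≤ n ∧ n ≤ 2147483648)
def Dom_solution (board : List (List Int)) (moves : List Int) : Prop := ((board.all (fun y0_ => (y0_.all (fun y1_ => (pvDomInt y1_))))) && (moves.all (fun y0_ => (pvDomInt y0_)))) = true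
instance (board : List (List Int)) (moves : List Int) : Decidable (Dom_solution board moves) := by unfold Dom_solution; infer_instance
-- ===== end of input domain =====

-- B replaces A's upfront transpose+strip table by lazy per-column cursors scanned on demand (objective: alternative, same cost; A pops from its own transposed copy, so neither program mutates the caller's board).

-- ===== PORT A =====
-- zip(*rows): truncates at the shortest row; fuel = length of the first row bounds the iterations exactly.
def pyZipStarAux : Nat → List (List Int) → List (List Int)
  | 0, _ => []
  | fuel+1, rows =>
    if rows.all (fun r => !r.isEmpty) then
      rows.map (fun r => r.headD 0) :: pyZipStarAux fuel (rows.map List.tail)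
    else []

def pyZipStar (rows : List (List Int)) : List (List Int) :=
  match rows with
  | [] => []
  | r :: rest => pyZipStarAux r.length (r :: rest)

-- loop body of A's second for-loop; state = (board (transposed, stripped), rlist, answer)
def stepA (st : List (List Int) × List Int × Int) (j : Int) : List (List Int) × List Int × Int :=
  let i := j - 1
  match PySem.List.pyGet? st.1 i with
  | none => st              -- Python raises IndexError here (excluded by Pre_)
  | some col =>
    if col.length = 0 then st
    else
      match PySem.List.pop? col 0 with
      | none => st          -- unreachable: col is nonempty
      | some (sel, col') =>
        let bd' := PySem.List.pySetD st.1 i col'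
        if st.2.1.length ≠ 0 ∧ PySem.List.pyGet? st.2.1 (-1) = some sel then
          (bd', st.2.1.dropLast, st.2.2 + 1)   -- rlist.pop(-1) on a nonempty list = dropLast (exact)
        else
          (bd', st.2.1 ++ [sel], st.2.2)

def solution (board : List (List Int)) (moves : List Int) : Int :=
  let tb := (pyZipStar board).map (fun col => col.filter (fun i => i != 0))
  (moves.foldl stepA (tb, ([] : List Int), (0 : Int))).2.2 * 2

-- ===== PORT B =====
-- 'while r < nrows and board[r][col] == 0: r += 1'; fuel = len(board) bounds the iterations.
def scanDown (board : List (List Int)) (col : Int) : Nat → Int → Int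
  | 0, r => r
  | fuel+1, r =>
    if r < (board.length : Int) ∧ ((PySem.List.pyGet? board r).bind (fun row => PySem.List.pyGet? row col)) = some 0
    then scanDown board col fuel (r + 1)
    else r

-- loop body of B's for-loop; state = (cursor, stack, pairs)
def stepB (board : List (List Int)) (st : List Int × List Int × Int) (m : Int) : List Int × List Int × Int :=
  let col := m - 1
  match PySem.List.pyGet? st.1 col with
  | none => st              -- Python raises IndexError here (excluded by Pre_)
  | some r0 =>
    let r := scanDown board col board.length r0
    if r = (board.length : Int) then st
    else
      match (PySem.List.pyGet? board r).bind (fun row => PySem.List.pyGet? row col) with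
      | none => st          -- unreachable under Pre_
      | some v =>
        let cursor' := PySem.List.pySetD st.1 col (r + 1)
        if st.2.1.length ≠ 0 ∧ PySem.List.pyGet? st.2.1 (-1) = some v then
          (cursor', st.2.1.dropLast, st.2.2 + 1)   -- stack.pop() on a nonempty list = dropLast (exact)
        else
          (cursor', st.2.1 ++ [v], st.2.2)

def solution_alt (board : List (List Int)) (moves : List Int) : Int :=
  let ncols := PySem.List.minD (board.map (fun row => (row.length : Int))) (fun x => x) 0
  (moves.foldl (stepB board) (List.replicate ncols.toNat (0 : Int), ([] : List Int), (0 : Int))).2.2 * 2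

-- ===== PRECONDITION & SPEC =====
-- Pre_ admits every move in the index range of the transposed board when A returns an ordinary value:
-- positive moves up to the shortest row length always, and nonpositive (wraparound) moves only on
-- rectangular boards; it excludes moves on which A raises IndexError, and nonpositive moves on ragged
-- boards, where A's negative-index wraparound on the min-length-truncated transpose and B's per-row
-- wraparound are both accidental, equally defensible values of a malformed input.
def Pre_solution (board : List (List Int)) (moves : List Int) : Prop :=
  ∀ m ∈ moves, board ≠ [] ∧
    ((1 ≤ m ∧ ∀ row ∈ board, m ≤ (row.length : Int)) ∨
     (m ≤ 0 ∧ (∀ row ∈ board, row.length = (board.headD []).length) ∧ 1 - ((board.headD []).length : Int) ≤ m))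
instance (board : List (List Int)) (moves : List Int) : Decidable (Pre_solution board moves) := by
  unfold Pre_solution; infer_instance

def pvWitness_solution : List (List Int) × List Int := ([[0, 3], [1, 2]], [1, 2, 2, 1])

def Spec_solution (board : List (List Int)) (moves : List Int) (out : Int) : Prop := out = solution_alt board moves
instance (board : List (List Int)) (moves : List Int) (out : Int) : Decidable (Spec_solution board moves out) := by unfold Spec_solution; infer_instance

-- ===== CLAIM (what is proved, stated in full; the proofs are below) =====
def Claim_equal_solution : Prop := ∀ (board : List (List Int)) (moves : List Int), Dom_solution board moves → Pre_solution board moves → Spec_solution board moves (solution board moves)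

-- ===== LEMMAS AND PROOFS =====

-- minimum row length (0 for an empty board) = length of zip(*board)
def minLen : List (List Int) → Nat
  | [] => 0
  | r :: rest => rest.foldl (fun a row => min a row.length) r.length

-- the still-unpicked part of column c, rows r.., zeros stripped
def colFrom (board : List (List Int)) (c : Nat) (r : Nat) : List Int :=
  ((board.drop r).map (fun row => row.getD c 0)).filter (fun v => v != 0)

lemma mfold_le_acc (l : List (List Int)) : ∀ a : Nat, l.foldl (fun a row => min a row.length) a ≤ a := by
  induction l with
  | nil => intro a; simp
  | cons x t ih =>
    intro a
    simp only [List.foldl_cons]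
    exact le_trans (ih _) (Nat.min_le_left _ _)

lemma mfold_le_mem (l : List (List Int)) : ∀ a : Nat, ∀ row ∈ l, l.foldl (fun a row => min a row.length) a ≤ row.length := by
  induction l with
  | nil => intro a row h; simp at h
  | cons x t ih =>
    intro a row h
    simp only [List.foldl_cons]
    rcases List.mem_cons.mp h with h | h
    · subst h; exact le_trans (mfold_le_acc _ _) (Nat.min_le_right _ _)
    · exact ih _ row h

lemma le_mfold (l : List (List Int)) : ∀ a k : Nat, k ≤ a → (∀ row ∈ l, k ≤ row.length) → k ≤ l.foldl (fun a row => min a row.length) a := by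
  induction l with
  | nil => intro a k h _; simpa using h
  | cons x t ih =>
    intro a k h hall
    simp only [List.foldl_cons]
    exact ih _ k (le_min h (hall x List.mem_cons_self)) (fun row hr => hall row (List.mem_cons_of_mem _ hr))

lemma minLen_le_of_mem {board : List (List Int)} {row : List Int} (h : row ∈ board) : minLen board ≤ row.length := by
  cases board with
  | nil => simp at h
  | cons r rest =>
    rcases List.mem_cons.mp h with h | h
    · subst h; exact mfold_le_acc _ _
    · exact mfold_le_mem _ _ _ h

lemma int_le_mfold (l : List (List Int)) : ∀ (a : Nat) (k : Int), k ≤ (a : Int) → (∀ row ∈ l, k ≤ (row.length : Int)) → k ≤ ((l.foldl (fun a row => min a row.length) a : Nat) : Int) := by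
  induction l with
  | nil => intro a k h _; simpa using h
  | cons x t ih =>
    intro a k h hall
    simp only [List.foldl_cons]
    refine ih _ k ?_ (fun row hr => hall row (List.mem_cons_of_mem _ hr))
    have := hall x List.mem_cons_self
    push_cast
    exact le_min h this

lemma le_minLen_int {board : List (List Int)} {k : Int} (hne : board ≠ []) (h : ∀ row ∈ board, k ≤ (row.length : Int)) : k ≤ (minLen board : Int) := by
  cases board with
  | nil => exact absurd rfl hne
  | cons r rest =>
    exact int_le_mfold rest r.length k (h r List.mem_cons_self) (fun row hr => h row (List.mem_cons_of_mem _ hr))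

lemma mfold_sub_one (l : List (List Int)) : ∀ a : Nat, l.foldl (fun a row => min a (row.length - 1)) (a - 1) = l.foldl (fun a row => min a row.length) a - 1 := by
  induction l with
  | nil => intro a; simp
  | cons x t ih =>
    intro a
    simp only [List.foldl_cons]
    rw [show min (a - 1) (x.length - 1) = min a x.length - 1 by omega]
    exact ih _

lemma minLen_map_tail (r : List Int) (rest : List (List Int)) :
    minLen ((r :: rest).map List.tail) = minLen (r :: rest) - 1 := by
  simp only [List.map_cons, minLen, List.foldl_map, List.length_tail]
  exact mfold_sub_one rest r.length

lemma getD_zero_headD (row : List Int) : row.getD 0 0 = row.headD 0 := by cases row <;> rfl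

lemma getD_succ_tail (row : List Int) (c : Nat) : row.getD (c + 1) 0 = row.tail.getD c 0 := by cases row <;> rfl

lemma zipAux_eq : ∀ (fuel : Nat) (rows : List (List Int)), rows ≠ [] → minLen rows ≤ fuel →
    pyZipStarAux fuel rows = (List.range (minLen rows)).map (fun c => rows.map (fun row => row.getD c 0)) := by
  intro fuel
  induction fuel with
  | zero =>
    intro rows _ hle
    have : minLen rows = 0 := Nat.le_zero.mp hle
    simp [pyZipStarAux, this]
  | succ fuel ih =>
    intro rows hne hall_or
    by_cases hall : rows.all (fun r => !r.isEmpty) = true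
    · -- every row nonempty
      have hne1 : ∀ row ∈ rows, row ≠ [] := by
        intro row hr
        have := List.all_eq_true.mp hall row hr
        simpa [List.isEmpty_iff] using this
      have h1 : 1 ≤ minLen rows := by
        obtain ⟨r, rest, rfl⟩ := List.exists_cons_of_ne_nil hne
        apply le_mfold
        · exact Nat.one_le_iff_ne_zero.mpr (by simpa [List.length_eq_zero_iff] using hne1 r List.mem_cons_self)
        · intro row hr
          exact Nat.one_le_iff_ne_zero.mpr (by simpa [List.length_eq_zero_iff] using hne1 row (List.mem_cons_of_mem _ hr))
      have htail : minLen (rows.map List.tail) = minLen rows - 1 := by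
        obtain ⟨r, rest, rfl⟩ := List.exists_cons_of_ne_nil hne
        exact minLen_map_tail r rest
      have hrec := ih (rows.map List.tail) (by simpa using hne) (by omega)
      have hstep : pyZipStarAux (fuel + 1) rows
          = rows.map (fun r => r.headD 0) :: pyZipStarAux fuel (rows.map List.tail) := by
        obtain ⟨r, rest, rfl⟩ := List.exists_cons_of_ne_nil hne
        simp only [pyZipStarAux, hall, if_true]
      rw [hstep, hrec, htail]
      obtain ⟨k, hk⟩ : ∃ k, minLen rows = k + 1 := ⟨minLen rows - 1, by omega⟩
      rw [hk]
      simp only [Nat.add_sub_cancel]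
      rw [List.range_succ_eq_map, List.map_cons]
      refine congrArg₂ List.cons ?_ ?_
      · exact List.map_congr_left (fun row _ => (getD_zero_headD row).symm)
      · rw [List.map_map]
        refine List.map_congr_left (fun c _ => ?_)
        simp only [Function.comp_apply, List.map_map]
        refine List.map_congr_left (fun row _ => ?_)
        simp only [Function.comp_apply]
        rw [show c.succ = c + 1 from rfl, getD_succ_tail]
    · -- some row empty: minLen rows = 0
      have : ∃ row ∈ rows, row.isEmpty := by
        by_contra h
        push_neg at h
        exact hall (List.all_eq_true.mpr (fun row hr => by simpa using h row hr))
      obtain ⟨row, hmem, hemp⟩ := this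
      have hz : minLen rows = 0 := by
        have h1 := minLen_le_of_mem hmem
        have h2 : row.length = 0 := by simp [List.isEmpty_iff.mp hemp]
        omega
      obtain ⟨r, rest, rfl⟩ := List.exists_cons_of_ne_nil hne
      simp [pyZipStarAux, hall, hz]

lemma pyZipStar_eq (board : List (List Int)) :
    pyZipStar board = (List.range (minLen board)).map (fun c => board.map (fun row => row.getD c 0)) := by
  cases board with
  | nil => simp [pyZipStar, minLen]
  | cons r rest => exact zipAux_eq r.length (r :: rest) (by simp) (mfold_le_acc _ _)

lemma cast_mfold (l : List (List Int)) : ∀ a : Nat, l.foldl (fun x row => min x (row.length : Int)) (a : Int) = ((l.foldl (fun x row => min x row.length) a : Nat) : Int) := by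
  induction l with
  | nil => intro a; simp
  | cons x t ih =>
    intro a
    simp only [List.foldl_cons]
    rw [show min ((a : Nat) : Int) ((x.length : Int)) = ((min a x.length : Nat) : Int) from by push_cast; rfl]
    exact ih _

lemma minD_eq_minLen (board : List (List Int)) :
    PySem.List.minD (board.map (fun row => (row.length : Int))) (fun x => x) 0 = (minLen board : Int) := by
  cases board with
  | nil => simp [PySem.List.minD, PySem.List.min?, minLen]
  | cons r rest =>
    simp only [List.map_cons, PySem.List.minD, PySem.List.min?_id_cons, Option.getD_some, minLen]
    rw [List.foldl_map]
    exact cast_mfold rest r.length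

lemma pyGet_resolve {α : Type} (d : α) (xs : List α) (i : Int) (c : Nat) (hc : c < xs.length)
    (hi : i = (c : Int) ∨ i = (c : Int) - (xs.length : Int)) :
    PySem.List.pyGet? xs i = some (xs.getD c d) := by
  rcases hi with h | h <;> subst h
  · rw [PySem.List.pyGet?_natCast, List.getElem?_eq_getElem hc, List.getD_eq_getElem _ _ hc]
  · have hk : (c : Int) - (xs.length : Int) = -(((xs.length - c : Nat) : Int)) := by
      push_cast [Nat.cast_sub (le_of_lt hc)]
      ring
    rw [hk, PySem.List.pyGet?_neg_natCast _ _ (by omega) (by omega),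
      show xs.length - (xs.length - c) = c by omega,
      List.getElem?_eq_getElem hc, List.getD_eq_getElem _ _ hc]

lemma pySetD_resolve {α : Type} (xs : List α) (i : Int) (c : Nat) (v : α) (hc : c < xs.length)
    (hi : i = (c : Int) ∨ i = (c : Int) - (xs.length : Int)) :
    PySem.List.pySetD xs i v = xs.set c v := by
  unfold PySem.List.pySetD PySem.List.pySet? PySem.List.pyIdx?
  rcases hi with h | h <;> subst h
  · rw [if_pos (by omega), if_pos (by exact_mod_cast hc)]
    simp
  · rw [if_neg (by omega), if_pos (by omega)]
    rw [show xs.length - (-((c : Int) - (xs.length : Int))).toNat = c by omega]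
    simp

lemma mfold_const (l : List (List Int)) : ∀ a : Nat, (∀ row ∈ l, row.length = a) → l.foldl (fun x row => min x row.length) a = a := by
  induction l with
  | nil => intro a _; rfl
  | cons x t ih =>
    intro a h
    simp only [List.foldl_cons, h x List.mem_cons_self, min_self]
    exact ih a (fun row hr => h row (List.mem_cons_of_mem _ hr))

lemma minLen_rect {board : List (List Int)} (hne : board ≠ [])
    (hrect : ∀ row ∈ board, row.length = (board.headD []).length) :
    minLen board = (board.headD []).length := by
  cases board with
  | nil => exact absurd rfl hne
  | cons r rest =>
    simp only [List.headD_cons] at hrect ⊢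
    exact mfold_const rest r.length (fun row hr => hrect row (List.mem_cons_of_mem _ hr))

lemma colFrom_nil (board : List (List Int)) (c : Nat) : colFrom board c board.length = [] := by
  simp [colFrom]

lemma colFrom_zero_step {board : List (List Int)} {c s : Nat} (hs : s < board.length)
    (h : (board[s]'hs).getD c 0 = 0) : colFrom board c s = colFrom board c (s + 1) := by
  unfold colFrom
  rw [List.drop_eq_getElem_cons hs, List.map_cons, List.filter_cons]
  simp only [List.getD] at h
  simp [h]

lemma colFrom_nonzero_step {board : List (List Int)} {c s : Nat} (hs : s < board.length)
    (h : (board[s]'hs).getD c 0 ≠ 0) :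
    colFrom board c s = (board[s]'hs).getD c 0 :: colFrom board c (s + 1) := by
  unfold colFrom
  rw [List.drop_eq_getElem_cons hs, List.map_cons, List.filter_cons]
  simp only [List.getD] at h
  simp [h]

lemma scan_spec (board : List (List Int)) (col : Int) (c : Nat)
    (hrow : ∀ row ∈ board, PySem.List.pyGet? row col = some (row.getD c 0)) :
    ∀ (fuel r : Nat), r ≤ board.length → board.length - r ≤ fuel →
    ∃ s : Nat, scanDown board col fuel (r : Int) = (s : Int) ∧ r ≤ s ∧ s ≤ board.length ∧
      colFrom board c r = colFrom board c s ∧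
      (s = board.length ∨ (∃ hs : s < board.length, (board[s]'hs).getD c 0 ≠ 0)) := by
  intro fuel
  induction fuel with
  | zero =>
    intro r hr hf
    exact ⟨r, rfl, le_refl r, hr, rfl, Or.inl (by omega)⟩
  | succ fuel ih =>
    intro r hr hf
    by_cases hlt : r < board.length
    · have hrowmem : board[r]'hlt ∈ board := List.getElem_mem hlt
      have hfetch : ((PySem.List.pyGet? board (r : Int)).bind (fun row => PySem.List.pyGet? row col)) = some ((board[r]'hlt).getD c 0) := by
        rw [PySem.List.pyGet?_natCast, List.getElem?_eq_getElem hlt]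
        simp only [Option.bind_some]
        exact hrow _ hrowmem
      by_cases hv : (board[r]'hlt).getD c 0 = 0
      · -- skip a zero
        have hcond : ((r : Int) < (board.length : Int) ∧ ((PySem.List.pyGet? board (r : Int)).bind (fun row => PySem.List.pyGet? row col)) = some 0) :=
          ⟨by exact_mod_cast hlt, by rw [hfetch, hv]⟩
        have hrw : ((r : Int) + 1) = ((r + 1 : Nat) : Int) := by push_cast; ring
        obtain ⟨s, h1, h2, h3, h4, h5⟩ := ih (r + 1) (by omega) (by omega)
        refine ⟨s, ?_, by omega, h3, ?_, h5⟩
        · simp only [scanDown, if_pos hcond, hrw, h1]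
        · rw [colFrom_zero_step hlt hv]; exact h4
      · -- found a doll
        have hcond : ¬((r : Int) < (board.length : Int) ∧ ((PySem.List.pyGet? board (r : Int)).bind (fun row => PySem.List.pyGet? row col)) = some 0) := by
          rintro ⟨-, h⟩
          rw [hfetch] at h
          exact hv (Option.some_injective _ h)
        exact ⟨r, by simp only [scanDown, if_neg hcond], le_refl r, hr, rfl, Or.inr ⟨hlt, hv⟩⟩
    · have hcond : ¬((r : Int) < (board.length : Int) ∧ ((PySem.List.pyGet? board (r : Int)).bind (fun row => PySem.List.pyGet? row col)) = some 0) := by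
        rintro ⟨h, -⟩
        exact hlt (by exact_mod_cast h)
      exact ⟨r, by simp only [scanDown, if_neg hcond], le_refl r, hr, rfl, Or.inl (by omega)⟩

-- the simulation invariant between A's state and B's state
def SimInv (board : List (List Int)) (stA : List (List Int) × List Int × Int) (stB : List Int × List Int × Int) : Prop :=
  stA.2.1 = stB.2.1 ∧ stA.2.2 = stB.2.2 ∧ stA.1.length = minLen board ∧ stB.1.length = minLen board ∧
  ∀ c, c < minLen board → ∃ r : Nat, stB.1.getD c 0 = (r : Int) ∧ r ≤ board.length ∧ stA.1.getD c [] = colFrom board c r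

lemma step_inv {board : List (List Int)} {stA : List (List Int) × List Int × Int} {stB : List Int × List Int × Int}
    {m : Int}
    (hm : (1 ≤ m ∧ m ≤ (minLen board : Int)) ∨
          ((∀ row ∈ board, row.length = minLen board) ∧ 1 - (minLen board : Int) ≤ m ∧ m ≤ 0))
    (hI : SimInv board stA stB) :
    SimInv board (stepA stA m) (stepB board stB m) := by
  obtain ⟨hstk, hans, hlenA, hlenB, hcols⟩ := hI
  set c : Nat := (if m - 1 < 0 then m - 1 + (minLen board : Int) else m - 1).toNat with hcdef
  have hkey : ((c : Int) = m - 1 ∨ ((c : Int) = m - 1 + (minLen board : Int) ∧ ∀ row ∈ board, row.length = minLen board)) ∧ c < minLen board := by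
    rcases hm with ⟨h1, h2⟩ | ⟨hrect, h1, h2⟩
    · rw [hcdef, if_neg (by omega)]
      exact ⟨Or.inl (by omega), by omega⟩
    · rw [hcdef, if_pos (by omega)]
      exact ⟨Or.inr ⟨by omega, hrect⟩, by omega⟩
  obtain ⟨hOr, hclt⟩ := hkey
  have hltA : c < stA.1.length := by omega
  have hltB : c < stB.1.length := by omega
  have hiA : m - 1 = (c : Int) ∨ m - 1 = (c : Int) - (stA.1.length : Int) := by
    rcases hOr with h | ⟨h, -⟩
    · left; omega
    · right; omega
  have hiB : m - 1 = (c : Int) ∨ m - 1 = (c : Int) - (stB.1.length : Int) := by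
    rcases hOr with h | ⟨h, -⟩
    · left; omega
    · right; omega
  have hgetA : PySem.List.pyGet? stA.1 (m - 1) = some (stA.1.getD c []) :=
    pyGet_resolve [] stA.1 (m - 1) c hltA hiA
  have hgetB : PySem.List.pyGet? stB.1 (m - 1) = some (stB.1.getD c 0) :=
    pyGet_resolve 0 stB.1 (m - 1) c hltB hiB
  have hrow : ∀ row ∈ board, PySem.List.pyGet? row (m - 1) = some (row.getD c 0) := by
    intro row hr
    rcases hOr with h | ⟨h, hrect⟩
    · exact pyGet_resolve 0 row _ c (lt_of_lt_of_le hclt (minLen_le_of_mem hr)) (Or.inl (by omega))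
    · have hrl := hrect row hr
      exact pyGet_resolve 0 row _ c (by omega) (Or.inr (by omega))
  obtain ⟨r, hr0, hrle, hcol⟩ := hcols c hclt
  obtain ⟨s, hscan', hrs, hsle, hsame, hdisj⟩ := scan_spec board (m - 1) c hrow board.length r hrle (by omega)
  cases hcolshape : colFrom board c r with
  | nil =>
    -- column exhausted: both sides skip
    have hsnr : s = board.length := by
      rcases hdisj with h | ⟨hs, hnz⟩
      · exact h
      · have h0 : colFrom board c s = [] := hsame ▸ hcolshape
        rw [colFrom_nonzero_step hs hnz] at h0
        cases h0
    have hA : stepA stA m = stA := by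
      simp only [stepA, hgetA, hcol, hcolshape]
      simp
    have hB : stepB board stB m = stB := by
      simp only [stepB, hgetB, hr0, hscan', hsnr]
      simp
    rw [hA, hB]
    exact ⟨hstk, hans, hlenA, hlenB, hcols⟩
  | cons sel rest =>
    -- a doll is taken from row s of column c
    have hslt : s < board.length := by
      rcases hdisj with h | ⟨hs, _⟩
      · exfalso
        have h0 : colFrom board c s = [] := h ▸ colFrom_nil board c
        rw [← hsame, hcolshape] at h0
        cases h0
      · exact hs
    have hnz : (board[s]'hslt).getD c 0 ≠ 0 := by
      rcases hdisj with h | ⟨hs, hnz⟩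
      · omega
      · exact hnz
    have hcons := colFrom_nonzero_step hslt hnz
    have hsel : (board[s]'hslt).getD c 0 = sel ∧ colFrom board c (s + 1) = rest := by
      have h0 := (hsame.symm.trans hcolshape)
      rw [hcons] at h0
      exact ⟨(List.cons.injEq _ _ _ _).mp h0 |>.1, (List.cons.injEq _ _ _ _).mp h0 |>.2⟩
    have hsne : ¬(((s : Nat) : Int) = ((board.length : Nat) : Int)) := by
      intro h
      omega
    have hfetch : ((PySem.List.pyGet? board ((s : Nat) : Int)).bind (fun row => PySem.List.pyGet? row (m - 1))) = some sel := by
      rw [PySem.List.pyGet?_natCast, List.getElem?_eq_getElem hslt]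
      simp only [Option.bind_some]
      rw [hrow _ (List.getElem_mem hslt), hsel.1]
    have hA : stepA stA m =
        (if ¬stA.2.1 = [] ∧ PySem.List.pyGet? stA.2.1 (-1) = some sel
         then (PySem.List.pySetD stA.1 (m - 1) rest, stA.2.1.dropLast, stA.2.2 + 1)
         else (PySem.List.pySetD stA.1 (m - 1) rest, stA.2.1 ++ [sel], stA.2.2)) := by
      simp only [stepA, hgetA, hcol, hcolshape, PySem.List.pop?_zero_cons]
      simp
    have hB : stepB board stB m =
        (if ¬stB.2.1 = [] ∧ PySem.List.pyGet? stB.2.1 (-1) = some sel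
         then (PySem.List.pySetD stB.1 (m - 1) (((s : Nat) : Int) + 1), stB.2.1.dropLast, stB.2.2 + 1)
         else (PySem.List.pySetD stB.1 (m - 1) (((s : Nat) : Int) + 1), stB.2.1 ++ [sel], stB.2.2)) := by
      simp only [stepB, hgetB, hr0, hscan', hfetch, if_neg hsne]
      simp
    have hsetA : PySem.List.pySetD stA.1 (m - 1) rest = stA.1.set c rest :=
      pySetD_resolve stA.1 (m - 1) c rest hltA hiA
    have hsetB : PySem.List.pySetD stB.1 (m - 1) (((s : Nat) : Int) + 1) = stB.1.set c (((s : Nat) : Int) + 1) :=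
      pySetD_resolve stB.1 (m - 1) c _ hltB hiB
    rw [hA, hB, hsetA, hsetB, hstk]
    -- the new states satisfy the invariant
    have hcore : ∀ c', c' < minLen board → ∃ r' : Nat,
        (stB.1.set c (((s : Nat) : Int) + 1)).getD c' 0 = ((r' : Nat) : Int) ∧ r' ≤ board.length ∧
        (stA.1.set c rest).getD c' [] = colFrom board c' r' := by
      intro c' hc'
      by_cases hcc : c = c'
      · subst hcc
        refine ⟨s + 1, ?_, by omega, ?_⟩
        · rw [List.getD_eq_getElem _ _ (by simpa using hltB), List.getElem_set_self]
          push_cast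
          ring
        · rw [List.getD_eq_getElem _ _ (by simpa using hltA), List.getElem_set_self]
          exact hsel.2.symm
      · have hltA' : c' < stA.1.length := by omega
        have hltB' : c' < stB.1.length := by omega
        obtain ⟨r', h1', h2', h3'⟩ := hcols c' hc'
        refine ⟨r', ?_, h2', ?_⟩
        · rw [List.getD_eq_getElem _ _ (by simpa using hltB'), List.getElem_set_ne hcc,
            ← List.getD_eq_getElem _ (0 : Int) hltB']
          exact h1'
        · rw [List.getD_eq_getElem _ _ (by simpa using hltA'), List.getElem_set_ne hcc,
            ← List.getD_eq_getElem _ ([] : List Int) hltA']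
          exact h3'
    by_cases hif : ¬stB.2.1 = [] ∧ PySem.List.pyGet? stB.2.1 (-1) = some sel
    · rw [if_pos hif, if_pos hif]
      exact ⟨rfl, by rw [hans], by simpa using hlenA, by simpa using hlenB, hcore⟩
    · rw [if_neg hif, if_neg hif]
      exact ⟨rfl, hans, by simpa using hlenA, by simpa using hlenB, hcore⟩

lemma fold_inv (board : List (List Int)) : ∀ (moves : List Int) stA stB,
    (∀ m ∈ moves, (1 ≤ m ∧ m ≤ (minLen board : Int)) ∨
      ((∀ row ∈ board, row.length = minLen board) ∧ 1 - (minLen board : Int) ≤ m ∧ m ≤ 0)) →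
    SimInv board stA stB →
    SimInv board (moves.foldl stepA stA) (moves.foldl (stepB board) stB) := by
  intro moves
  induction moves with
  | nil => intro stA stB _ h; simpa using h
  | cons m t ih =>
    intro stA stB hall hI
    simp only [List.foldl_cons]
    exact ih _ _ (fun x hx => hall x (List.mem_cons_of_mem _ hx))
      (step_inv (hall m List.mem_cons_self) hI)

lemma init_inv (board : List (List Int)) :
    SimInv board ((pyZipStar board).map (fun col => col.filter (fun i => i != 0)), ([] : List Int), (0 : Int))
      (List.replicate (PySem.List.minD (board.map (fun row => (row.length : Int))) (fun x => x) 0).toNat (0 : Int), ([] : List Int), (0 : Int)) := by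
  have hn : (PySem.List.minD (board.map (fun row => (row.length : Int))) (fun x => x) 0).toNat = minLen board := by
    rw [minD_eq_minLen]
    exact Int.toNat_natCast _
  refine ⟨rfl, rfl, ?_, ?_, ?_⟩
  · simp [pyZipStar_eq]
  · simp [hn]
  · intro c hc
    refine ⟨0, ?_, by omega, ?_⟩
    · simp only [hn]
      rw [List.getD_replicate _ hc]
      rfl
    · rw [pyZipStar_eq, List.map_map, PySem.List.getD_map_range _ _ _ _ hc]
      simp [colFrom, Function.comp]

-- ===== VERDICT (by name: the statement is the Claim_ definition above) =====
theorem solution_spec : Claim_equal_solution := by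
  intro board moves _dom hpre
  unfold Spec_solution solution solution_alt
  have hbounds : ∀ m ∈ moves, (1 ≤ m ∧ m ≤ (minLen board : Int)) ∨
      ((∀ row ∈ board, row.length = minLen board) ∧ 1 - (minLen board : Int) ≤ m ∧ m ≤ 0) := by
    intro m hm
    obtain ⟨hne, hca⟩ := hpre m hm
    rcases hca with ⟨h1, hall⟩ | ⟨h0, hrect, hlb⟩
    · exact Or.inl ⟨h1, le_minLen_int hne hall⟩
    · have hhead := minLen_rect hne hrect
      refine Or.inr ⟨fun row hr => by rw [hhead]; exact hrect row hr, by omega, h0⟩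
  have h := fold_inv board moves _ _ hbounds (init_inv board)
  exact congrArg (fun z => z * 2) h.2.1
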